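-- pv_equiv track=rewrite | github.com/FatMansKryptonite/resume_builder | utils.py | get_tiered_matches
-- ===== SOURCE A (Python) =====
-- def get_tiered_matches(keys: list, match: list) -> dict:
--     keyword_dict = {key: [] for key in keys}
--
--     key_mask = [elem in keys for elem in match]
--     keyword_tree = None
--     for i in range(len(match)):
--         is_key = key_mask[i]
--         elem = match[i]
--
--         if is_key:
--             keyword_tree = [elem]
--         else:
--             keyword_tree.append(elem)
--
--         if i+1 == len(match) or key_mask[i+1]:
--             keyword_dict[keyword_tree[0]].append(keyword_tree)
--
--     return keyword_dict
-- ===== SOURCE B (Python) =====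
-- def get_tiered_matches(keys: list, match: list) -> dict:
--     # Pass 1: record the index of each key in match and cut the list into
--     # slices between consecutive key positions.
--     keyset = set(keys)
--     segments = []
--     start = None
--     for i, elem in enumerate(match):
--         if elem in keyset:
--             if start is not None:
--                 segments.append(match[start:i])
--             start = i
--     if match:
--         segments.append(match[start:])
--     # Pass 2: bucket the slices by their leading key.
--     keyword_dict = {key: [] for key in keys}
--     for segment in segments:
--         keyword_dict[segment[0]].append(segment)
--     return keyword_dict
-- ===== Notes on version B (the rewrite author's own statement) =====
-- stated objective: simpler
-- what changed: B drops A's precomputed key-mask list, index loop with i+1 lookahead and mutable growing tree: one pass over match with a set of keys cuts it into slices between consecutive key positions, then a separate pass buckets the slices by their leading key.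
import Mathlib
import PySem

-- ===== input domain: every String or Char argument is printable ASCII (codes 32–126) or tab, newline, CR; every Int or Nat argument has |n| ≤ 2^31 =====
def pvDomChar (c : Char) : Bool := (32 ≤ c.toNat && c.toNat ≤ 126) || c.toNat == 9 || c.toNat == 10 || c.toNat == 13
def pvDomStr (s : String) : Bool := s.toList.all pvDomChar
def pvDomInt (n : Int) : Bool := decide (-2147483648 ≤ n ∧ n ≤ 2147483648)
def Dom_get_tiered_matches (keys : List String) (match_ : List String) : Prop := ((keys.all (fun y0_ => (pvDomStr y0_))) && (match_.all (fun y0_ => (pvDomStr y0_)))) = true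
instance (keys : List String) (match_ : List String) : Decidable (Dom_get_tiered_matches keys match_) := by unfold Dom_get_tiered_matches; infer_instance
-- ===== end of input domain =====

-- B replaces A's key-mask + lookahead single pass by two passes: cut match into slices
-- between key positions, then bucket the slices by their leading key (objective: simpler).

-- ===== PORT A =====
-- one iteration of A's for-loop: state = (keyword_tree, keyword_dict)
def pvStepA (match_ : List String) (key_mask : List Bool)
    (st : Option (List String) × PySem.Dict String (List (List String))) (i : Nat) :
    Option (List String) × PySem.Dict String (List (List String)) :=
  let is_key := key_mask.getD i false
  let elem := match_.getD i ""
  -- 'keyword_tree.append(elem)' on None raises AttributeError; the port keeps 'none' (outside Pre_)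
  let keyword_tree := if is_key then some [elem] else st.1.map (fun t => t ++ [elem])
  let d := if i + 1 == match_.length || key_mask.getD (i + 1) false then
      -- 'keyword_dict[keyword_tree[0]].append(keyword_tree)': under Pre_ the key is
      -- always present, so modify with default [] is exact (no KeyError reachable)
      match keyword_tree with
      | some t => st.2.modify (t.headD "") [] (fun v => v ++ [t])
      | none => st.2
    else st.2
  (keyword_tree, d)

def get_tiered_matches (keys : List String) (match_ : List String) : List (String × List (List String)) :=
  let keyword_dict : PySem.Dict String (List (List String)) :=
    keys.foldl (fun d key => d.insert key []) PySem.Dict.empty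
  let key_mask : List Bool := match_.map (fun elem => keys.contains elem)
  let res := (List.range match_.length).foldl (pvStepA match_ key_mask) (none, keyword_dict)
  res.2.items

-- ===== PORT B =====
-- one iteration of B's first pass: state = (segments, start)
def pvStepB (match_ : List String) (keyset : PySem.Set String)
    (st : List (List String) × Option Int) (p : Int × String) :
    List (List String) × Option Int :=
  if PySem.Set.contains keyset p.2 then
    (match st.2 with
     | some s => st.1 ++ [PySem.List.slice match_ (some s) (some p.1)]
     | none => st.1, some p.1)
  else st

def get_tiered_matches_alt (keys : List String) (match_ : List String) : List (String × List (List String)) :=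
  let keyset : PySem.Set String := PySem.Set.ofList keys
  let st := (PySem.List.enumerate match_).foldl (pvStepB match_ keyset) ([], none)
  let segments :=
    if match_.isEmpty then st.1
    else match st.2 with
      | some s => st.1 ++ [PySem.List.slice match_ (some s) none]
      | none => st.1  -- 'match[None:]' raises TypeError; unreachable under Pre_
  let keyword_dict : PySem.Dict String (List (List String)) :=
    keys.foldl (fun d key => d.insert key []) PySem.Dict.empty
  (segments.foldl (fun d segment => d.modify (segment.headD "") [] (fun v => v ++ [segment])) keyword_dict).items

-- ===== PRECONDITION & SPEC =====
-- Pre_ excludes exactly the inputs where A raises: a nonempty match whose first element is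
-- not a key (keyword_tree is still None there, so .append raises AttributeError).
def Pre_get_tiered_matches (keys : List String) (match_ : List String) : Prop :=
  match_ = [] ∨ match_.headD "" ∈ keys
instance (keys : List String) (match_ : List String) : Decidable (Pre_get_tiered_matches keys match_) := by unfold Pre_get_tiered_matches; infer_instance

def pvWitness_get_tiered_matches : List String × List String := (["a", "b"], ["a", "x", "b", "a"])

def Spec_get_tiered_matches (keys : List String) (match_ : List String) (out : List (String × List (List String))) : Prop := out = get_tiered_matches_alt keys match_
instance (keys : List String) (match_ : List String) (out : List (String × List (List String))) : Decidable (Spec_get_tiered_matches keys match_ out) := by unfold Spec_get_tiered_matches; infer_instance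

-- ===== CLAIM (what is proved, stated in full; the proofs are below) =====
def Claim_equal_get_tiered_matches : Prop := ∀ (keys : List String) (match_ : List String), Dom_get_tiered_matches keys match_ → Pre_get_tiered_matches keys match_ → Spec_get_tiered_matches keys match_ (get_tiered_matches keys match_)

-- ===== LEMMAS AND PROOFS =====

-- the common flush operation ('keyword_dict[t[0]].append(t)')
def pvFlush (d : PySem.Dict String (List (List String))) (t : List String) :
    PySem.Dict String (List (List String)) :=
  d.modify (t.headD "") [] (fun v => v ++ [t])

-- the canonical run splitter: cut 'cur ++ rest' into maximal runs, each run starting at a key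
def pvSplit (keys : List String) (cur : List String) : List String → List (List String)
  | [] => [cur]
  | x :: r => if keys.contains x then cur :: pvSplit keys [x] r else pvSplit keys (cur ++ [x]) r

-- the runs A's loop flushes while processing 'rest' with current tree 'c' (lookahead timing)
def pvEmitS (keys : List String) (c : List String) : List String → List (List String)
  | [] => []
  | [x] => [if keys.contains x then [x] else c ++ [x]]
  | x :: y :: r =>
    let t' := if keys.contains x then [x] else c ++ [x]
    if keys.contains y then t' :: pvEmitS keys t' (y :: r) else pvEmitS keys t' (y :: r)

-- A's final tree after processing 'rest' from tree 'c'
def pvLastS (keys : List String) (c : List String) : List String → List String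
  | [] => c
  | x :: r => pvLastS keys (if keys.contains x then [x] else c ++ [x]) r

lemma pvEmitS_eq_pvSplit (keys : List String) :
    ∀ (r : List String) (c : List String) (x : String),
      pvEmitS keys c (x :: r) = pvSplit keys (if keys.contains x then [x] else c ++ [x]) r := by
  intro r
  induction r with
  | nil => intro c x; simp [pvEmitS, pvSplit]
  | cons y r' ih =>
    intro c x
    by_cases hy : y ∈ keys <;>
      simp [pvEmitS, pvSplit, hy, ih]

lemma A_loop (keys m : List String) :
    ∀ (rest pre c : List String) (d : PySem.Dict String (List (List String))),
      m = pre ++ rest →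
      List.foldl (pvStepA m (m.map (fun e => keys.contains e))) (some c, d)
          (List.range' pre.length rest.length)
        = (some (pvLastS keys c rest), (pvEmitS keys c rest).foldl pvFlush d) := by
  intro rest
  induction rest with
  | nil => intro pre c d hm; simp [pvEmitS, pvLastS]
  | cons x r ih =>
    intro pre c d hm
    simp only [List.length_cons]
    rw [List.range'_succ, List.foldl_cons]
    have hb : pre.length < m.length := by simp [hm]
    have hget : m[pre.length]? = some x := by
      rw [hm, List.getElem?_append_right (Nat.le_refl _)]; simp
    have hE : m[pre.length] = x := by
      have h2 := hget; rw [List.getElem?_eq_getElem hb] at h2; exact Option.some.inj h2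
    cases r with
    | nil =>
      have hlen : m.length = pre.length + 1 := by simp [hm]
      by_cases hx : x ∈ keys <;>
        simp [pvStepA, List.getD, hE, hlen, pvEmitS, pvLastS, pvFlush, hx]
    | cons y r'' =>
      have hm' : m = (pre ++ [x]) ++ y :: r'' := by simp [hm]
      have hlen : (pre.length + 1 == m.length) = false := by
        rw [beq_eq_false_iff_ne]; simp [hm]
      have hget2 : m[pre.length + 1]? = some y := by
        have h2 : ((pre ++ [x]) ++ y :: r'')[(pre ++ [x]).length]? = some y := by
          rw [List.getElem?_append_right (Nat.le_refl _)]; simp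
        rw [← hm'] at h2; simpa using h2
      have hstep : pvStepA m (m.map (fun e => keys.contains e)) (some c, d) pre.length
          = (some (if keys.contains x then [x] else c ++ [x]),
             if keys.contains y then pvFlush d (if keys.contains x then [x] else c ++ [x]) else d) := by
        by_cases hx : x ∈ keys <;> by_cases hy : y ∈ keys <;>
          simp [pvStepA, List.getD, hget, hget2, hlen, pvFlush, hx, hy]
      rw [hstep]
      have ih' := ih (pre ++ [x]) (if keys.contains x then [x] else c ++ [x])
        (if keys.contains y then pvFlush d (if keys.contains x then [x] else c ++ [x]) else d) hm'
      simp only [List.length_append, List.length_cons, List.length_nil, Nat.zero_add] at ih' ⊢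
      rw [ih']
      by_cases hy : y ∈ keys <;> simp [pvEmitS, pvLastS, hy]

lemma B_loop (keys m : List String) :
    ∀ (rest pre : List String) (s : Nat) (segs : List (List String)),
      m = pre ++ rest → s ≤ pre.length →
      (let res := List.foldl (pvStepB m (PySem.Set.ofList keys)) (segs, some ((s : Nat) : Int))
          (PySem.List.enumerate rest ((pre.length : Nat) : Int));
       (match res.2 with
        | some s' => res.1 ++ [PySem.List.slice m (some s') none]
        | none => res.1)
        = segs ++ pvSplit keys ((m.drop s).take (pre.length - s)) rest) := by
  intro rest
  induction rest with
  | nil =>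
    intro pre s segs hm hs
    dsimp only
    have hdl : (m.drop s).length ≤ pre.length - s := by
      simp [hm, List.length_drop]
    rw [PySem.List.enumerate_nil, List.foldl_nil]
    simp [PySem.List.slice_from_natCast, pvSplit, List.take_of_length_le hdl]
  | cons x r ih =>
    intro pre s segs hm hs
    dsimp only
    rw [PySem.List.enumerate_cons, List.foldl_cons]
    have hm' : m = (pre ++ [x]) ++ r := by simp [hm]
    have hdrop : m.drop pre.length = x :: r := by rw [hm]; exact List.drop_left
    by_cases hx : x ∈ keys
    · have hstep : pvStepB m (PySem.Set.ofList keys) (segs, some ((s : Nat) : Int))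
            (((pre.length : Nat) : Int), x)
          = (segs ++ [(m.drop s).take (pre.length - s)], some ((pre.length : Nat) : Int)) := by
        simp [pvStepB, hx, PySem.List.slice_natCast]
      rw [hstep]
      have ih' := ih (pre ++ [x]) pre.length (segs ++ [(m.drop s).take (pre.length - s)]) hm'
        (by simp)
      simp only [List.length_append, List.length_cons, List.length_nil, Nat.zero_add] at ih'
      rw [show ((pre.length : Nat) : Int) + 1 = (((pre.length + 1 : Nat)) : Int) by push_cast; ring]
      rw [ih']
      have h1 : (m.drop pre.length).take (pre.length + 1 - pre.length) = [x] := by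
        simp [hdrop]
      rw [h1]
      simp [pvSplit, hx]
    · have hstep : pvStepB m (PySem.Set.ofList keys) (segs, some ((s : Nat) : Int))
            (((pre.length : Nat) : Int), x)
          = (segs, some ((s : Nat) : Int)) := by
        simp [pvStepB, hx]
      rw [hstep]
      have ih' := ih (pre ++ [x]) s segs hm' (by simp; omega)
      simp only [List.length_append, List.length_cons, List.length_nil, Nat.zero_add] at ih'
      rw [show ((pre.length : Nat) : Int) + 1 = (((pre.length + 1 : Nat)) : Int) by push_cast; ring]
      rw [ih']
      have hgx : (m.drop s)[pre.length - s]? = some x := by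
        rw [List.getElem?_drop, show s + (pre.length - s) = pre.length by omega]
        rw [hm, List.getElem?_append_right (Nat.le_refl _)]; simp
      have h1 : (m.drop s).take (pre.length + 1 - s)
          = (m.drop s).take (pre.length - s) ++ [x] := by
        rw [show pre.length + 1 - s = (pre.length - s) + 1 by omega, List.take_add_one, hgx]
        rfl
      rw [h1]
      simp [pvSplit, hx]

-- ===== VERDICT (by name: the statement is the Claim_ definition above) =====
theorem get_tiered_matches_spec : Claim_equal_get_tiered_matches := by
  intro keys match_ _ hpre
  unfold Spec_get_tiered_matches
  cases match_ with
  | nil => rfl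
  | cons h rest =>
    have hh : h ∈ keys := by
      rcases hpre with h1 | h1
      · cases h1
      · simpa using h1
    have hc : keys.contains h = true := by simpa using hh
    unfold get_tiered_matches get_tiered_matches_alt
    dsimp only
    -- A's loop
    have hA := A_loop keys (h :: rest) (h :: rest) [] [h]
      (keys.foldl (fun d key => d.insert key []) PySem.Dict.empty) rfl
    simp only [List.length_cons, List.length_nil] at hA ⊢
    rw [List.range'_succ, List.foldl_cons] at hA
    rw [List.range_eq_range', List.range'_succ, List.foldl_cons]
    have hstep0 : pvStepA (h :: rest) ((h :: rest).map (fun e => keys.contains e))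
          (none, keys.foldl (fun d key => d.insert key []) PySem.Dict.empty) 0
        = pvStepA (h :: rest) ((h :: rest).map (fun e => keys.contains e))
          (some [h], keys.foldl (fun d key => d.insert key []) PySem.Dict.empty) 0 := by
      simp [pvStepA, List.getD, hh]
    rw [hstep0, hA]
    -- B's first pass
    rw [PySem.List.enumerate_cons, List.foldl_cons]
    have hstepB : pvStepB (h :: rest) (PySem.Set.ofList keys) ([], none) ((0 : Int), h)
        = ([], some (0 : Int)) := by
      simp [pvStepB, PySem.Set.contains, PySem.Set.mem_ofList, hh]
    rw [hstepB]
    have hB := B_loop keys (h :: rest) rest [h] 0 [] rfl (by simp)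
    dsimp only at hB
    simp only [Nat.cast_zero, Nat.cast_one, List.length_cons, List.length_nil, Nat.zero_add,
      List.drop_zero, Nat.sub_zero, List.take_succ_cons, List.take_zero, List.nil_append] at hB
    simp only [List.isEmpty_cons, Bool.false_eq_true, if_false, zero_add]
    rw [hB]
    rw [pvEmitS_eq_pvSplit keys rest [h] h, hc]
    have hfl : (fun (d : PySem.Dict String (List (List String))) (segment : List String) =>
        d.modify (segment.headD "") [] fun v => v ++ [segment]) = pvFlush := by
      funext d t; rfl
    rw [hfl, if_pos rfl]
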